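-- pv_equiv track=rewrite | github.com/Sino0on/ques_lavka | mysite/views.py | group_categories
-- ===== SOURCE A (Python) =====
-- def group_categories(categories):
--     result = []
--     pattern = [2, 3]  # Чередуем 2 и 3
--     index = 0
--     i = 0
--     while index < len(categories):
--         group_size = pattern[i % len(pattern)]
--         result.append(categories[index:index + group_size])
--         index += group_size
--         i += 1
--     return result
-- ===== SOURCE B (Python) =====
-- def group_categories(categories):
--     result = []
--     it = iter(categories)
--     size = 2
--     _end = object()
--     while True:
--         chunk = []
--         for _ in range(size):
--             x = next(it, _end)
--             if x is _end:
--                 break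
--             chunk.append(x)
--         if not chunk:
--             break
--         result.append(chunk)
--         size = 5 - size
--     return result
-- ===== Notes on version B (the rewrite author's own statement) =====
-- stated objective: idiomatic
-- what changed: Replaced A's while-loop over a slice offset, a pattern table and a parity counter by sequential iterator consumption: repeatedly pull an alternating-size (2,3) chunk off an iterator and stop at the first empty chunk.
import Mathlib
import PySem

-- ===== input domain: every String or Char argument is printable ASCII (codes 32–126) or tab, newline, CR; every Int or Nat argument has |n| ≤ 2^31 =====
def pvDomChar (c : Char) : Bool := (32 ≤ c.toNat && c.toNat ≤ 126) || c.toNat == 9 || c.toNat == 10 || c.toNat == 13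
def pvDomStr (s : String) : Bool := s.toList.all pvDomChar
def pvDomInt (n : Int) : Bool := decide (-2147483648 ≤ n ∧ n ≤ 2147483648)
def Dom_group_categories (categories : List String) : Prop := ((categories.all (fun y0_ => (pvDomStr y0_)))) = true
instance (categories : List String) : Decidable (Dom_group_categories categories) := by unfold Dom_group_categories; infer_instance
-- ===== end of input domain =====

-- B consumes the input through an iterator, collecting chunks of alternating size
-- 2,3 until a chunk comes out empty, instead of A's slice-offset arithmetic (objective: idiomatic).

-- ===== PORT A =====
lemma group_categories_go_dec (len index i : Nat) (h : index < len) :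
    len - (index + [2, 3].getD (i % 2) 0) < len - index := by
  rcases Nat.mod_two_eq_zero_or_one i with h2 | h2 <;> simp [h2] <;> omega

-- while-loop over index/i, transliterated as recursion on the remaining distance
def group_categories_go (categories : List String) (index i : Nat) : List (List String) :=
  if _h : index < categories.length then
    let group_size : Nat := [2, 3].getD (i % 2) 0
    PySem.List.slice categories (some (index : Int)) (some ((index : Int) + (group_size : Int)))
      :: group_categories_go categories (index + group_size) (i + 1)
  else []
termination_by categories.length - index
decreasing_by
  exact group_categories_go_dec categories.length index i _h

def group_categories (categories : List String) : List (List String) :=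
  group_categories_go categories 0 0

-- ===== PORT B =====
-- inner for-loop: pull up to `size` elements off the iterator, returning (chunk, rest)
def gc_chunk : List String → Nat → List String × List String
  | rest, 0 => ([], rest)
  | [], _ + 1 => ([], [])
  | x :: xs, n + 1 =>
    let p := gc_chunk xs n
    (x :: p.1, p.2)

lemma gc_chunk_eq (rest : List String) (size : Nat) :
    gc_chunk rest size = (rest.take size, rest.drop size) := by
  induction rest generalizing size with
  | nil => cases size <;> simp [gc_chunk]
  | cons x xs ih => cases size <;> simp [gc_chunk, ih]

lemma gc_go_dec (rest : List String) (size : Nat) (h : ¬ (gc_chunk rest size).1 = []) :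
    (gc_chunk rest size).2.length < rest.length := by
  simp only [gc_chunk_eq] at h ⊢
  have hs : size ≠ 0 := by rintro rfl; simp at h
  have hr : rest ≠ [] := by rintro rfl; simp at h
  have h1 : 0 < rest.length := List.length_pos_iff.mpr hr
  simp only [List.length_drop]
  omega

-- outer while-loop: stop at the first empty chunk, else record it and toggle the size
def gc_go (rest : List String) (size : Nat) : List (List String) :=
  let p := gc_chunk rest size
  if _h : p.1 = [] then [] else p.1 :: gc_go p.2 (5 - size)
termination_by rest.length
decreasing_by
  exact gc_go_dec rest size _h

def group_categories_alt (categories : List String) : List (List String) :=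
  gc_go categories 2

-- ===== PRECONDITION & SPEC =====
def Spec_group_categories (categories : List String) (out : List (List String)) : Prop := out = group_categories_alt categories
instance (categories : List String) (out : List (List String)) : Decidable (Spec_group_categories categories out) := by unfold Spec_group_categories; infer_instance

-- ===== CLAIM (what is proved, stated in full; the proofs are below) =====
def Claim_equal_group_categories : Prop := ∀ (categories : List String), Dom_group_categories categories → Spec_group_categories categories (group_categories categories)

-- ===== LEMMAS AND PROOFS =====

lemma gc_go_eq (rest : List String) (size : Nat) :
    gc_go rest size =
      if rest.take size = [] then [] else rest.take size :: gc_go (rest.drop size) (5 - size) := by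
  rw [gc_go.eq_def]
  simp [gc_chunk_eq]

lemma gc_go_nil (size : Nat) : gc_go [] size = [] := by
  simp [gc_go_eq]

lemma go_eq_alt (n : Nat) : ∀ (cats : List String) (index i : Nat),
    cats.length - index ≤ n →
    group_categories_go cats index i =
      gc_go (cats.drop index) (if i % 2 = 0 then 2 else 3) := by
  induction n with
  | zero =>
    intro cats index i hn
    have hge : cats.length ≤ index := by omega
    rw [group_categories_go]
    simp [Nat.not_lt.mpr hge, List.drop_eq_nil_of_le hge, gc_go_nil]
  | succ n ih =>
    intro cats index i hn
    rw [group_categories_go]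
    by_cases hlt : index < cats.length
    · simp only [hlt, dif_pos]
      have hne : cats.drop index ≠ [] := by
        simp [List.drop_eq_nil_iff]; omega
      rcases Nat.mod_two_eq_zero_or_one i with h2 | h2
      · have hi1 : (i + 1) % 2 = 1 := by omega
        simp only [h2, List.getD, List.getElem?_cons_zero, Option.getD_some, if_pos]
        rw [PySem.List.slice_natCast_add, ih cats (index + 2) (i + 1) (by omega),
          gc_go_eq (cats.drop index) 2]
        simp [hi1, hne, List.drop_drop]
      · have hi1 : (i + 1) % 2 = 0 := by omega
        simp only [h2, List.getD, List.getElem?_cons_zero, List.getElem?_cons_succ,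
          Option.getD_some]
        rw [PySem.List.slice_natCast_add, ih cats (index + 3) (i + 1) (by omega)]
        simp [hi1, hne, List.drop_drop, gc_go_eq (cats.drop index) 3]
    · simp only [hlt, dif_neg, not_false_iff]
      have hge : cats.length ≤ index := by omega
      simp [List.drop_eq_nil_of_le hge, gc_go_nil]

-- ===== VERDICT (by name: the statement is the Claim_ definition above) =====
theorem group_categories_spec : Claim_equal_group_categories := by
  intro categories _
  unfold Spec_group_categories group_categories group_categories_alt
  rw [go_eq_alt (categories.length) categories 0 0 (by omega)]
  simp
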